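-- pv_equiv track=rewrite | github.com/Ifnister/og | core.py | _report_str
-- ===== SOURCE A (Python) =====
-- _LINE_LENGTH = 60
--
-- _TEXT_NUMBER_OFFSET = 22
--
-- def _report_str(dic, ls):
--     auxls = []
--     subls = []
--     counter = 0
--     for elem in ls:
--         assert _TEXT_NUMBER_OFFSET - len(elem) + 1 >= 0
--         subls.append(elem + ' ' * (_TEXT_NUMBER_OFFSET - len(elem) + 1) + str(dic[elem]) + ' ' * (_LINE_LENGTH // 2 - _TEXT_NUMBER_OFFSET - len(str(dic[elem]))))
--         counter += 1
--         if not counter % 2: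
--             auxls.append(''.join(subls))
--             subls = []
--     return '\n'.join(auxls)
-- ===== SOURCE B (Python) =====
-- _LINE_LENGTH = 60
--
-- _TEXT_NUMBER_OFFSET = 22
--
--
-- def _report_str(dic, ls):
--     # Phase 1: build all padded cells.
--     cells = []
--     for elem in ls:
--         assert _TEXT_NUMBER_OFFSET - len(elem) + 1 >= 0
--         num = str(dic[elem])
--         cells.append(elem + ' ' * (_TEXT_NUMBER_OFFSET - len(elem) + 1)
--                      + num + ' ' * (_LINE_LENGTH // 2 - _TEXT_NUMBER_OFFSET - len(num)))
--     # Phase 2: consume the cells two at a time; an unpaired last cell is dropped.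
--     rows = []
--     while len(cells) >= 2:
--         rows.append(''.join((cells[0], cells[1])))
--         cells = cells[2:]
--     return '\n'.join(rows)
-- ===== Notes on version B (the rewrite author's own statement) =====
-- stated objective: simpler
-- what changed: Replaces A's single fold with a counter, a pending-row buffer and a parity test by two plain phases: build the list of padded cells, then pair consecutive cells two at a time (dropping an unpaired last cell).
import Mathlib
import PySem

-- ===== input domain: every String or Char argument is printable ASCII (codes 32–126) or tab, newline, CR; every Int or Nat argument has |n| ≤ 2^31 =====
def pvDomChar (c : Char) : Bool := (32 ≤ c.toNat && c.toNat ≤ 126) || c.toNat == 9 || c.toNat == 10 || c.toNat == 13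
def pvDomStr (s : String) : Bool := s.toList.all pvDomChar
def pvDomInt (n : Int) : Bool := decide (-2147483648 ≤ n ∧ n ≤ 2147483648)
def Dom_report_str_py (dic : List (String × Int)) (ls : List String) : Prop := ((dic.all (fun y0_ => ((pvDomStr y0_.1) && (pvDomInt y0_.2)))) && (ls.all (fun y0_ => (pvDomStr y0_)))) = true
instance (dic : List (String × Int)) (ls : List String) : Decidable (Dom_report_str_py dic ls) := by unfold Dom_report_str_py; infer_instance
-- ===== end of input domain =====

-- B replaces A's fold with counter/parity/pending-buffer by two phases (build padded cells, then pair
-- consecutive cells); proved equal on inputs where A returns (keys present, names ≤ 23 chars).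


-- ===== PORT A =====
-- ' ' * n  (Python: a negative count yields the empty string, as Int.toNat's clamp does)
def pvSpaces (n : Int) : String := String.ofList (List.replicate n.toNat ' ')

-- elem + ' '*(22 - len(elem) + 1) + str(dic[elem]) + ' '*(60//2 - 22 - len(str(dic[elem])))
-- (dic[elem]: a missing key raises KeyError in Python and is excluded by Pre_; `.getD 0` is unreachable there)
def pvCell (dic : List (String × Int)) (elem : String) : String :=
  let num := PySem.Int.toStr ((PySem.Dict.get? ⟨dic⟩ elem).getD 0)
  elem ++ pvSpaces (22 - PySem.Str.len elem + 1) ++ num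
       ++ pvSpaces (PySem.Int.floordiv 60 2 - 22 - PySem.Str.len num)

-- the body of A's for-loop, one element: append the cell to subls, bump counter, flush on even
def pvStepA (dic : List (String × Int)) (st : List String × List String × Int) (elem : String) :
    List String × List String × Int :=
  let subls := st.2.1 ++ [pvCell dic elem]
  let counter := st.2.2 + 1
  if PySem.Int.mod counter 2 = 0 then (st.1 ++ [PySem.Str.join "" subls], [], counter)
  else (st.1, subls, counter)

def report_str_py (dic : List (String × Int)) (ls : List String) : String :=
  let st := ls.foldl (pvStepA dic) ([], [], 0)
  PySem.Str.join "\n" st.1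

-- ===== PORT B =====
-- the while-loop of Source B: len(cells) >= 2 → emit ''.join((cells[0], cells[1])), continue on cells[2:]
def pvRows : List String → List String
  | c0 :: c1 :: rest => PySem.Str.join "" [c0, c1] :: pvRows rest
  | _ => []

def report_str_py_alt (dic : List (String × Int)) (ls : List String) : String :=
  PySem.Str.join "\n" (pvRows (ls.map (pvCell dic)))

-- ===== PRECONDITION & SPEC =====
-- Pre_ excludes exactly the inputs where A raises: an element longer than 23 chars (AssertionError)
-- or not a key of dic (KeyError). B raises identically there.
def Pre_report_str_py (dic : List (String × Int)) (ls : List String) : Prop :=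
  ∀ e ∈ ls, PySem.Str.len e ≤ 23 ∧ (PySem.Dict.get? (⟨dic⟩ : PySem.Dict String Int) e).isSome = true
instance (dic : List (String × Int)) (ls : List String) : Decidable (Pre_report_str_py dic ls) := by unfold Pre_report_str_py; infer_instance

def pvWitness_report_str_py : (List (String × Int)) × List String :=
  ([("ax", 7), ("b", -12)], ["b", "ax", "b"])

def Spec_report_str_py (dic : List (String × Int)) (ls : List String) (out : String) : Prop := out = report_str_py_alt dic ls
instance (dic : List (String × Int)) (ls : List String) (out : String) : Decidable (Spec_report_str_py dic ls out) := by unfold Spec_report_str_py; infer_instance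

-- ===== CLAIM (what is proved, stated in full; the proofs are below) =====
def Claim_equal_report_str_py : Prop := ∀ (dic : List (String × Int)) (ls : List String), Dom_report_str_py dic ls → Pre_report_str_py dic ls → Spec_report_str_py dic ls (report_str_py dic ls)

-- ===== LEMMAS AND PROOFS =====

-- A's loop, started in an even-counter state with an empty pending buffer, produces exactly
-- the paired rows of the cells of the remaining elements, appended to the rows so far.
theorem reportA_loop_eq (dic : List (String × Int)) :
    ∀ (l : List String) (aux : List String) (c : Int), c % 2 = 0 →
      (l.foldl (pvStepA dic) (aux, [], c)).1 = aux ++ pvRows (l.map (pvCell dic)) := by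
  intro l
  induction l using pvRows.induct with
  | case1 x y rest ih =>
    intro aux c hc
    have h1 : ¬ PySem.Int.mod (c + 1) 2 = 0 := by
      rw [PySem.Int.mod_eq_emod_of_pos (by omega)]; omega
    have h2 : PySem.Int.mod (c + 1 + 1) 2 = 0 := by
      rw [PySem.Int.mod_eq_emod_of_pos (by omega)]; omega
    simp only [List.foldl, List.map, pvRows, pvStepA, List.nil_append, List.singleton_append, if_neg h1, if_pos h2]
    rw [ih (aux ++ [PySem.Str.join "" [pvCell dic x, pvCell dic y]]) (c + 1 + 1) (by omega)]
    simp
  | case2 l h =>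
    intro aux c hc
    match l, h with
    | [], _ => simp [pvRows]
    | [x], _ =>
      have h1 : ¬ (2 ∣ c + 1) := by omega
      simp [List.foldl, pvRows, pvStepA, h1]
    | x :: y :: r, h => exact absurd rfl (h x y r)

-- ===== VERDICT (by name: the statement is the Claim_ definition above) =====
theorem report_str_py_spec : Claim_equal_report_str_py := by
  intro dic ls _ _
  unfold Spec_report_str_py report_str_py report_str_py_alt
  show PySem.Str.join "\n" (ls.foldl (pvStepA dic) ([], [], 0)).1
      = PySem.Str.join "\n" (pvRows (ls.map (pvCell dic)))
  rw [reportA_loop_eq dic ls [] 0 (by omega)]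
  simp
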